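-- pv_equiv track=rewrite | github.com/Moeabdelaziz007/amrikyy | mcp/agents/logic_agent.py | _prioritize_suggestions
-- ===== SOURCE A (Python) =====
-- from typing import Dict, List, Any, Optional
--
-- def _prioritize_suggestions(suggestions: List[str]) -> List[Dict[str, str]]:
--     """Prioritize suggestions based on impact and effort."""
--     prioritized = []
--
--     for suggestion in suggestions:
--         priority = 'medium'
--         effort = 'low'
--
--         # Determine priority based on keywords
--         if any(keyword in suggestion.lower() for keyword in ['complexity', 'performance', 'security']):
--             priority = 'high'
--         elif any(keyword in suggestion.lower() for keyword in ['documentation', 'naming', 'style']):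
--             priority = 'low'
--
--         # Determine effort
--         if any(keyword in suggestion.lower() for keyword in ['refactor', 'restructure', 'redesign']):
--             effort = 'high'
--         elif any(keyword in suggestion.lower() for keyword in ['add', 'consider', 'use']):
--             effort = 'low'
--
--         prioritized.append({
--             'suggestion': suggestion,
--             'priority': priority,
--             'effort': effort
--         })
--
--     # Sort by priority
--     priority_order = {'high': 3, 'medium': 2, 'low': 1}
--     prioritized.sort(key=lambda x: priority_order.get(x['priority'], 0), reverse=True)
--
--     return prioritized
-- ===== SOURCE B (Python) =====
-- def _prioritize_suggestions(suggestions):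
--     """Prioritize suggestions based on impact and effort."""
--     high, medium, low = [], [], []
--
--     for suggestion in suggestions:
--         text = suggestion.lower()
--
--         effort = 'high' if any(k in text for k in ('refactor', 'restructure', 'redesign')) else 'low'
--
--         if any(k in text for k in ('complexity', 'performance', 'security')):
--             priority, bucket = 'high', high
--         elif any(k in text for k in ('documentation', 'naming', 'style')):
--             priority, bucket = 'low', low
--         else:
--             priority, bucket = 'medium', medium
--
--         bucket.append({'suggestion': suggestion, 'priority': priority, 'effort': effort})
--
--     return high + medium + low
-- ===== Notes on version B (the rewrite author's own statement) =====
-- stated objective: alternative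
-- what changed: Replaces the build-then-stable-reverse-sort with a single pass that partitions suggestions into three priority buckets (lowercasing each suggestion once) and returns high+medium+low, which reproduces the stable sort's tie order.
import Mathlib
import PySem

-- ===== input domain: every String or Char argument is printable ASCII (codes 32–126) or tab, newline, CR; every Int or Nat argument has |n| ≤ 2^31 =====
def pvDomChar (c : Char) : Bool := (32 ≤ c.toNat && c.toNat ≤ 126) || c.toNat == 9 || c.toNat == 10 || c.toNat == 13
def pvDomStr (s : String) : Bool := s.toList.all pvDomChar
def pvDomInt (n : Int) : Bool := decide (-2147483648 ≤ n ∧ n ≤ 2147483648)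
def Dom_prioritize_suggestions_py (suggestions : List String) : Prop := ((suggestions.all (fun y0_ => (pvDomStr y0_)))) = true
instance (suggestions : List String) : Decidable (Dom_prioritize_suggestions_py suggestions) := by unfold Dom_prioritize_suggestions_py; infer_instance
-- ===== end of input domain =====

-- B replaces A's build-then-stable-reverse-sort by a one-pass three-bucket partition (high/medium/low) returning high++medium++low; same return value.

-- ===== PORT A =====
def pvRowA (s : String) : List (String × String) :=
  let priority : String :=
    if (["complexity", "performance", "security"].any (fun k => PySem.Str.isIn k (PySem.Str.lower s))) then "high"
    else if (["documentation", "naming", "style"].any (fun k => PySem.Str.isIn k (PySem.Str.lower s))) then "low"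
    else "medium"
  let effort : String :=
    if (["refactor", "restructure", "redesign"].any (fun k => PySem.Str.isIn k (PySem.Str.lower s))) then "high"
    else if (["add", "consider", "use"].any (fun k => PySem.Str.isIn k (PySem.Str.lower s))) then "low"
    else "low"
  [("suggestion", s), ("priority", priority), ("effort", effort)]

def pvOrder : PySem.Dict String Int := PySem.Dict.ofList [("high", 3), ("medium", 2), ("low", 1)]

-- x['priority']: the key is always present in the rows this function builds, so getD's default is never read
def pvKeyA (x : List (String × String)) : Int := pvOrder.getD ((PySem.Dict.mk x).getD "priority" "") 0

def prioritize_suggestions_py (suggestions : List String) : List (List (String × String)) :=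
  let prioritized := suggestions.foldl (fun acc s => acc ++ [pvRowA s]) []
  PySem.List.sorted prioritized pvKeyA true

-- ===== PORT B =====
def pvRowB (s p e : String) : List (String × String) :=
  [("suggestion", s), ("priority", p), ("effort", e)]

def pvStep (acc : List (List (String × String)) × List (List (String × String)) × List (List (String × String)))
    (s : String) :
    List (List (String × String)) × List (List (String × String)) × List (List (String × String)) :=
  let text := PySem.Str.lower s
  let effort : String :=
    if ["refactor", "restructure", "redesign"].any (fun k => PySem.Str.isIn k text) then "high" else "low"
  if ["complexity", "performance", "security"].any (fun k => PySem.Str.isIn k text) then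
    (acc.1 ++ [pvRowB s "high" effort], acc.2.1, acc.2.2)
  else if ["documentation", "naming", "style"].any (fun k => PySem.Str.isIn k text) then
    (acc.1, acc.2.1, acc.2.2 ++ [pvRowB s "low" effort])
  else
    (acc.1, acc.2.1 ++ [pvRowB s "medium" effort], acc.2.2)

def prioritize_suggestions_py_alt (suggestions : List String) : List (List (String × String)) :=
  let b := suggestions.foldl pvStep ([], [], [])
  b.1 ++ b.2.1 ++ b.2.2

-- ===== PRECONDITION & SPEC =====
def Spec_prioritize_suggestions_py (suggestions : List String) (out : List (List (String × String))) : Prop := out = prioritize_suggestions_py_alt suggestions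
instance (suggestions : List String) (out : List (List (String × String))) : Decidable (Spec_prioritize_suggestions_py suggestions out) := by unfold Spec_prioritize_suggestions_py; infer_instance

-- ===== CLAIM (what is proved, stated in full; the proofs are below) =====
def Claim_equal_prioritize_suggestions_py : Prop := ∀ (suggestions : List String), Dom_prioritize_suggestions_py suggestions → Spec_prioritize_suggestions_py suggestions (prioritize_suggestions_py suggestions)

-- ===== LEMMAS AND PROOFS =====

lemma pvKey_rowB (s e : String) (p : String) (hp : p = "high" ∨ p = "medium" ∨ p = "low") :
    pvKeyA (pvRowB s p e) = if p = "high" then 3 else if p = "medium" then 2 else 1 := by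
  rcases hp with h | h | h <;> subst h <;>
    (simp [pvKeyA, pvRowB, pvOrder, PySem.Dict.getD, PySem.Dict.get?_mk_cons]) <;> decide

lemma pvInsertBy_middle {α : Type} (bef : α → α → Bool) (x : α) (pre post : List α)
    (h1 : ∀ y ∈ pre, bef x y = false)
    (h2 : ∀ z ∈ post.head?, bef x z = true) :
    PySem.List.insertBy bef x (pre ++ post) = pre ++ x :: post := by
  induction pre with
  | nil =>
      cases post with
      | nil => simp [PySem.List.insertBy]
      | cons z t => simp [PySem.List.insertBy, h2 z rfl]
  | cons p ps ih =>
      have hp : bef x p = false := h1 p (List.mem_cons_self ..)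
      simp [PySem.List.insertBy, hp, ih (fun y hy => h1 y (List.mem_cons_of_mem _ hy))]

lemma pvRowA_eq (s : String) :
    pvRowA s = pvRowB s
      (if (["complexity", "performance", "security"].any (fun k => PySem.Str.isIn k (PySem.Str.lower s))) then "high"
       else if (["documentation", "naming", "style"].any (fun k => PySem.Str.isIn k (PySem.Str.lower s))) then "low"
       else "medium")
      (if (["refactor", "restructure", "redesign"].any (fun k => PySem.Str.isIn k (PySem.Str.lower s))) then "high"
       else "low") := by
  simp [pvRowA, pvRowB]

lemma pvInv (xs : List String) (h m l : List (List (String × String)))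
    (hh : ∀ r ∈ h, pvKeyA r = 3) (hm : ∀ r ∈ m, pvKeyA r = 2) (hl : ∀ r ∈ l, pvKeyA r = 1) :
    xs.foldl (fun acc s => PySem.List.insertBy (fun a b => decide (pvKeyA b < pvKeyA a)) (pvRowA s) acc)
        (h ++ m ++ l)
      = (xs.foldl pvStep (h, m, l)).1 ++ (xs.foldl pvStep (h, m, l)).2.1 ++ (xs.foldl pvStep (h, m, l)).2.2 := by
  induction xs generalizing h m l with
  | nil => rfl
  | cons s xs ih =>
      simp only [List.foldl_cons]
      set e := (if (["refactor", "restructure", "redesign"].any (fun k => PySem.Str.isIn k (PySem.Str.lower s))) then "high" else ("low" : String)) with he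
      by_cases c1 : (["complexity", "performance", "security"].any (fun k => PySem.Str.isIn k (PySem.Str.lower s))) = true
      · have hrow : pvRowA s = pvRowB s "high" e := by rw [pvRowA_eq, if_pos c1, ← he]
        have hkey : pvKeyA (pvRowA s) = 3 := by rw [hrow, pvKey_rowB s e "high" (Or.inl rfl)]; simp
        have hstep : pvStep (h, m, l) s = (h ++ [pvRowB s "high" e], m, l) := by
          simp only [pvStep]; rw [if_pos c1, ← he]
        have hins : PySem.List.insertBy (fun a b => decide (pvKeyA b < pvKeyA a)) (pvRowA s) (h ++ m ++ l)
            = (h ++ [pvRowB s "high" e]) ++ m ++ l := by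
          rw [List.append_assoc h m l,
            pvInsertBy_middle _ _ h (m ++ l)
              (by intro y hy; simp [hh y hy, hkey])
              (by intro z hz
                  cases m with
                  | cons a t => simp at hz; subst hz; simp [hm a (List.mem_cons_self ..), hkey]
                  | nil =>
                      cases l with
                      | nil => simp at hz
                      | cons a t => simp at hz; subst hz; simp [hl a (List.mem_cons_self ..), hkey]),
            hrow]
          simp
        rw [hstep, hins]
        exact ih (h ++ [pvRowB s "high" e]) m l
          (by intro r hr; rcases List.mem_append.1 hr with hr | hr
              · exact hh r hr
              · simp at hr; subst hr; rw [pvKey_rowB s e "high" (Or.inl rfl)]; simp)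
          hm hl
      · by_cases c2 : (["documentation", "naming", "style"].any (fun k => PySem.Str.isIn k (PySem.Str.lower s))) = true
        · have hrow : pvRowA s = pvRowB s "low" e := by rw [pvRowA_eq, if_neg c1, if_pos c2, ← he]
          have hkey : pvKeyA (pvRowA s) = 1 := by rw [hrow, pvKey_rowB s e "low" (Or.inr (Or.inr rfl))]; simp
          have hstep : pvStep (h, m, l) s = (h, m, l ++ [pvRowB s "low" e]) := by
            simp only [pvStep]; rw [if_neg c1, if_pos c2, ← he]
          have hins : PySem.List.insertBy (fun a b => decide (pvKeyA b < pvKeyA a)) (pvRowA s) (h ++ m ++ l)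
              = h ++ m ++ (l ++ [pvRowB s "low" e]) := by
            rw [PySem.List.insertBy_of_forall_not_before _ _ _
                (by intro y hy
                    rcases List.mem_append.1 hy with hy | hy
                    · rcases List.mem_append.1 hy with hy | hy
                      · simp [hh y hy, hkey]
                      · simp [hm y hy, hkey]
                    · simp [hl y hy, hkey]),
              hrow]
            simp
          rw [hstep, hins]
          exact ih h m (l ++ [pvRowB s "low" e]) hh hm
            (by intro r hr; rcases List.mem_append.1 hr with hr | hr
                · exact hl r hr
                · simp at hr; subst hr; rw [pvKey_rowB s e "low" (Or.inr (Or.inr rfl))]; simp)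
        · have hrow : pvRowA s = pvRowB s "medium" e := by rw [pvRowA_eq, if_neg c1, if_neg c2, ← he]
          have hkey : pvKeyA (pvRowA s) = 2 := by rw [hrow, pvKey_rowB s e "medium" (Or.inr (Or.inl rfl))]; simp
          have hstep : pvStep (h, m, l) s = (h, m ++ [pvRowB s "medium" e], l) := by
            simp only [pvStep]; rw [if_neg c1, if_neg c2, ← he]
          have hins : PySem.List.insertBy (fun a b => decide (pvKeyA b < pvKeyA a)) (pvRowA s) (h ++ m ++ l)
              = h ++ (m ++ [pvRowB s "medium" e]) ++ l := by
            rw [pvInsertBy_middle _ _ (h ++ m) l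
                (by intro y hy
                    rcases List.mem_append.1 hy with hy | hy
                    · simp [hh y hy, hkey]
                    · simp [hm y hy, hkey])
                (by intro z hz
                    cases l with
                    | nil => simp at hz
                    | cons a t => simp at hz; subst hz; simp [hl a (List.mem_cons_self ..), hkey]),
              hrow]
            simp
          rw [hstep, hins]
          exact ih h (m ++ [pvRowB s "medium" e]) l hh
            (by intro r hr; rcases List.mem_append.1 hr with hr | hr
                · exact hm r hr
                · simp at hr; subst hr; rw [pvKey_rowB s e "medium" (Or.inr (Or.inl rfl))]; simp)
            hl

-- ===== VERDICT (by name: the statement is the Claim_ definition above) =====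
theorem prioritize_suggestions_py_spec : Claim_equal_prioritize_suggestions_py := by
  intro suggestions _
  unfold Spec_prioritize_suggestions_py prioritize_suggestions_py prioritize_suggestions_py_alt
  rw [PySem.List.foldl_append_singleton_eq_map, PySem.List.sorted_rev_eq_foldl_insertBy,
    List.nil_append, List.foldl_map]
  simpa using pvInv suggestions [] [] [] (by simp) (by simp) (by simp)
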